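-- pv_equiv track=rewrite | github.com/Verizon/boogio | boogio/utensils/leading_string.py | without_common_leading_substring
-- ===== SOURCE A (Python) =====
-- def without_common_leading_substring(strings):
--     '''Find what's left when a common leading substring is removed.
--
--     Arguments:
--
--         strings (list):
--             A list of strings.
--
--     Returns:
--
--         (list): A list of the remaining tails of strings after the
--         common leading substring is removed from each.
--
--     Example::
--
--         >>> without_common_leading_substring(
--         ...     ['abc123', 'abc456', 'abXY', 'abXZ', 'abCCC', 'abDDD']
--         ...     )
--         ['c123', 'c456', 'XY', 'XZ', 'CCC', 'DDD']
--
--     '''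
--
--     common_len_max = min([len(s) for s in strings])
--
--     # Run through strings until we hit a position where they differ.
--     posn = 0
--     while posn < common_len_max:
--         if len(set([s[posn] for s in strings])) > 1:
--             break
--         posn += 1
--
--     # posn now holds the index of the first not-common character in
--     # strings. E.g. for ['abcd', 'abc', 'abcxyz'] posn would now be 3.
--     return [s[posn:] for s in strings]
-- ===== SOURCE B (Python) =====
-- def _lcp(a, b):
--     """Longest common prefix of two strings."""
--     n = min(len(a), len(b))
--     i = 0
--     while i < n and a[i] == b[i]:
--         i += 1
--     return a[:i]
--
--
-- def without_common_leading_substring(strings):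
--     """Pairwise-fold re-implementation: collapse the list to a single
--     common prefix with a two-string LCP helper, then strip it."""
--     prefix = strings[0]
--     for s in strings[1:]:
--         prefix = _lcp(prefix, s)
--     return [s[len(prefix):] for s in strings]
-- ===== Notes on version B (the rewrite author's own statement) =====
-- stated objective: alternative
-- what changed: Replaces A's column-wise scan (build the set of characters at each position across all strings) by a pairwise fold: a two-string longest-common-prefix helper folded over the list, then strip the resulting prefix.
import Mathlib
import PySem

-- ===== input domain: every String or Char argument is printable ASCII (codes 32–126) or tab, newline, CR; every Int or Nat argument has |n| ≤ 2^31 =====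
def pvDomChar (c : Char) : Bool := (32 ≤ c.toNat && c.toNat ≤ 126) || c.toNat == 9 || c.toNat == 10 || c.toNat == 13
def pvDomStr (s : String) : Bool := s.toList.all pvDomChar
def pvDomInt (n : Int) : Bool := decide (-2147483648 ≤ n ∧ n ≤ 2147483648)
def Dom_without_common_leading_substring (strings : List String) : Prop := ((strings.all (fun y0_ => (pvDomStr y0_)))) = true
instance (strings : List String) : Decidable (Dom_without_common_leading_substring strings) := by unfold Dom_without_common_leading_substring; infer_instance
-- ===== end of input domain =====

-- B replaces A's column-wise scan (character set per position) by folding a two-string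
-- longest-common-prefix helper over the list; alternative decomposition, same exact result.


-- ===== PORT A =====
-- the while-loop: advance posn while the characters at posn across all strings form a 1-element set
def pvALoop (css : List (List Char)) (maxc posn : Nat) : Nat :=
  if posn < maxc then
    if 1 < (PySem.Set.ofList (css.map (fun s => s[posn]!))).length then posn
    else pvALoop css maxc (posn + 1)
  else posn
termination_by maxc - posn

def without_common_leading_substring (strings : List String) : List String :=
  let css := strings.map String.toList
  match PySem.List.min? (css.map List.length) (fun x => x) with  -- min([len(s) for s in strings]); none = ValueError on []
  | none => []
  | some maxc =>
    let posn := pvALoop css maxc 0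
    css.map (fun s => String.mk (s.drop posn))   -- [s[posn:] for s in strings], posn ≥ 0

-- ===== PORT B =====
-- _lcp's while loop: advance i while i < n and a[i] == b[i]
def pvLcpLoop (a b : List Char) (n i : Nat) : Nat :=
  if i < n ∧ a[i]! = b[i]! then pvLcpLoop a b n (i + 1) else i
termination_by n - i
decreasing_by omega

def pvLcp (a b : List Char) : List Char :=
  a.take (pvLcpLoop a b (min a.length b.length) 0)   -- a[:i]

def without_common_leading_substring_alt (strings : List String) : List String :=
  match strings.map String.toList with
  | [] => []                                       -- Python B raises IndexError here (outside Pre_)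
  | h :: t =>
    let pref := t.foldl pvLcp h                  -- for s in strings[1:]: prefix = _lcp(prefix, s)
    (h :: t).map (fun s => String.mk (s.drop pref.length))   -- [s[len(prefix):] for s in strings]

-- ===== PRECONDITION & SPEC =====
-- Pre_ excludes only the empty list, on which A raises ValueError (min of an empty sequence).
def Pre_without_common_leading_substring (strings : List String) : Prop := strings ≠ []
instance (strings : List String) : Decidable (Pre_without_common_leading_substring strings) := by unfold Pre_without_common_leading_substring; infer_instance
def pvWitness_without_common_leading_substring : List String := ["abc", "abd"]
def Spec_without_common_leading_substring (strings : List String) (out : List String) : Prop := out = without_common_leading_substring_alt strings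
instance (strings : List String) (out : List String) : Decidable (Spec_without_common_leading_substring strings out) := by unfold Spec_without_common_leading_substring; infer_instance

-- ===== CLAIM (what is proved, stated in full; the proofs are below) =====
def Claim_equal_without_common_leading_substring : Prop := ∀ (strings : List String), Dom_without_common_leading_substring strings → Pre_without_common_leading_substring strings → Spec_without_common_leading_substring strings (without_common_leading_substring strings)

-- ===== LEMMAS AND PROOFS =====

-- structural longest common prefix (proof-side reference)
def lcpS : List Char → List Char → List Char
  | a :: as, b :: bs => if a = b then a :: lcpS as bs else []
  | _, _ => []

theorem lcpS_prefix_left : ∀ a b : List Char, lcpS a b <+: a := by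
  intro a
  induction a with
  | nil => intro b; cases b <;> simp [lcpS]
  | cons x as ih =>
    intro b
    cases b with
    | nil => simp [lcpS]
    | cons y bs =>
      by_cases h : x = y
      · simp only [lcpS, if_pos h]
        exact List.cons_prefix_cons.mpr ⟨rfl, ih bs⟩
      · simp [lcpS, h]

theorem lcpS_prefix_right : ∀ a b : List Char, lcpS a b <+: b := by
  intro a
  induction a with
  | nil => intro b; cases b <;> simp [lcpS]
  | cons x as ih =>
    intro b
    cases b with
    | nil => simp [lcpS]
    | cons y bs =>
      by_cases h : x = y
      · subst h
        simp only [lcpS, if_true]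
        exact List.cons_prefix_cons.mpr ⟨rfl, ih bs⟩
      · simp [lcpS, h]

theorem le_lcpS_of_take_eq : ∀ (a b : List Char) (k : Nat), k ≤ a.length → k ≤ b.length →
    a.take k = b.take k → k ≤ (lcpS a b).length := by
  intro a
  induction a with
  | nil => intro b k hka _ _; simp at hka; omega
  | cons x as ih =>
    intro b k hka hkb htake
    cases b with
    | nil => simp at hkb; omega
    | cons y bs =>
      cases k with
      | zero => omega
      | succ k' =>
        simp [List.take_succ_cons] at htake
        obtain ⟨hxy, htl⟩ := htake
        subst hxy
        simp [lcpS]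
        have := ih bs k' (by simpa using hka) (by simpa using hkb) htl
        omega

theorem ne_at_lcpS : ∀ a b : List Char, (lcpS a b).length < a.length →
    (lcpS a b).length < b.length → a[(lcpS a b).length]? ≠ b[(lcpS a b).length]? := by
  intro a
  induction a with
  | nil => intro b h _; simp at h
  | cons x as ih =>
    intro b ha hb
    cases b with
    | nil => simp at hb
    | cons y bs =>
      by_cases h : x = y
      · subst h
        simp [lcpS] at ha hb ⊢
        exact ih bs ha hb
      · simp [lcpS, h]

theorem prefix_getElem? {l₁ l₂ : List Char} (h : l₁ <+: l₂) {j : Nat} (hj : j < l₁.length) :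
    l₂[j]? = l₁[j]? := by
  rw [List.prefix_iff_eq_take.mp h, List.getElem?_take_of_lt hj]

-- the B loop computes the length of lcpS
theorem pvLcpLoop_eq (a b : List Char) (i : Nat) (hi : i ≤ (lcpS a b).length) :
    pvLcpLoop a b (min a.length b.length) i = (lcpS a b).length := by
  have hla := (lcpS_prefix_left a b).length_le
  have hlb := (lcpS_prefix_right a b).length_le
  by_cases hlt : i < (lcpS a b).length
  · have hia : i < a.length := by omega
    have hib : i < b.length := by omega
    have hq : a[i]? = b[i]? := by
      rw [prefix_getElem? (lcpS_prefix_left a b) hlt, prefix_getElem? (lcpS_prefix_right a b) hlt]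
    have heq : a[i]! = b[i]! := by
      rw [getElem!_pos a i hia, getElem!_pos b i hib]
      have := hq
      rw [List.getElem?_eq_getElem hia, List.getElem?_eq_getElem hib] at this
      exact Option.some.inj this
    rw [pvLcpLoop]
    rw [if_pos ⟨(by omega : i < min a.length b.length), heq⟩]
    exact pvLcpLoop_eq a b (i + 1) (by omega)
  · have hip : i = (lcpS a b).length := by omega
    subst hip
    rw [pvLcpLoop]
    by_cases hm : (lcpS a b).length < min a.length b.length
    · have hia : (lcpS a b).length < a.length := by omega
      have hib : (lcpS a b).length < b.length := by omega
      have hne := ne_at_lcpS a b hia hib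
      have : a[(lcpS a b).length]! ≠ b[(lcpS a b).length]! := by
        rw [getElem!_pos a _ hia, getElem!_pos b _ hib]
        intro hcc
        apply hne
        rw [List.getElem?_eq_getElem hia, List.getElem?_eq_getElem hib, hcc]
      rw [if_neg (by intro hc; exact this hc.2)]
    · rw [if_neg (by intro hc; exact hm hc.1)]
termination_by min a.length b.length - i
decreasing_by omega

theorem pvLcp_eq_lcpS (a b : List Char) : pvLcp a b = lcpS a b := by
  rw [pvLcp, pvLcpLoop_eq a b 0 (Nat.zero_le _)]
  exact (List.prefix_iff_eq_take.mp (lcpS_prefix_left a b)).symm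

theorem fold_prefix : ∀ (t : List (List Char)) (h : List Char),
    (t.foldl lcpS h <+: h) ∧ ∀ s ∈ t, t.foldl lcpS h <+: s := by
  intro t
  induction t with
  | nil => intro h; simp
  | cons s t ih =>
    intro h
    obtain ⟨ih1, ih2⟩ := ih (lcpS h s)
    refine ⟨ih1.trans (lcpS_prefix_left h s), ?_⟩
    intro s' hs'
    rcases List.mem_cons.mp hs' with hs' | hs'
    · exact hs' ▸ ih1.trans (lcpS_prefix_right h s)
    · exact ih2 s' hs'

theorem fold_max : ∀ (t : List (List Char)) (h : List Char) (k : Nat), k ≤ h.length →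
    (∀ s ∈ t, k ≤ s.length ∧ s.take k = h.take k) → k ≤ (t.foldl lcpS h).length := by
  intro t
  induction t with
  | nil => intro h k hk _; simpa using hk
  | cons s t ih
  =>
    intro h k hk hall
    obtain ⟨hks, hts⟩ := hall s (by simp)
    have hkl : k ≤ (lcpS h s).length := le_lcpS_of_take_eq h s k hk hks hts.symm
    apply ih (lcpS h s) k hkl
    intro s' hs'
    obtain ⟨hks', hts'⟩ := hall s' (by simp [hs'])
    refine ⟨hks', ?_⟩
    rw [hts']
    rw [List.prefix_iff_eq_take.mp (lcpS_prefix_left h s)]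
    rw [List.take_take, min_eq_left hkl]

theorem foldl_add_const (c : Char) (l : List Char) (h : ∀ x ∈ l, x = c) :
    List.foldl PySem.Set.add [c] l = [c] := by
  induction l with
  | nil => rfl
  | cons x t ih =>
    have hx : x = c := h x (by simp)
    subst hx
    simp only [List.foldl_cons]
    have ha : PySem.Set.add [x] x = [x] := by simp [PySem.Set.add, PySem.Set.contains]
    rw [ha]
    exact ih (fun y hy => h y (by simp [hy]))

theorem ofList_const (l : List Char) (c : Char) (hne : l ≠ []) (hall : ∀ x ∈ l, x = c) :
    PySem.Set.ofList l = [c] := by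
  cases l with
  | nil => simp at hne
  | cons x t =>
    have hx : x = c := hall x (by simp)
    subst hx
    rw [PySem.Set.ofList_eq_foldl, List.foldl_cons]
    have he : PySem.Set.add [] x = [x] := by simp [PySem.Set.add, PySem.Set.contains]
    rw [he]
    exact foldl_add_const x t (fun y hy => hall y (by simp [hy]))

theorem two_mem_lt_length (l : List Char) (x y : Char) (hx : x ∈ l) (hy : y ∈ l) (hxy : x ≠ y) :
    1 < (PySem.Set.ofList l).length := by
  have hx' := (PySem.Set.mem_ofList l x).mpr hx
  have hy' := (PySem.Set.mem_ofList l y).mpr hy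
  match hl : PySem.Set.ofList l with
  | [] => rw [hl] at hx'; simp at hx'
  | [z] =>
    rw [hl] at hx' hy'; simp at hx' hy'
    exact absurd (hx'.trans hy'.symm) hxy
  | _ :: _ :: _ => simp

-- the A loop returns p, the length of the fold prefix
theorem pvALoop_eq (hd : List Char) (t : List (List Char)) (maxc p : Nat)
    (hple : p ≤ maxc)
    (hmax : ∀ s ∈ hd :: t, maxc ≤ s.length)
    (hagree : ∀ j < p, ∀ s ∈ hd :: t, s[j]? = hd[j]?)
    (hdis : p < maxc → ∃ s ∈ hd :: t, s[p]? ≠ hd[p]?) :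
    ∀ i, i ≤ p → pvALoop (hd :: t) maxc i = p := by
  intro i hi
  rw [pvALoop]
  by_cases hlt : i < p
  · have him : i < maxc := by omega
    rw [if_pos him]
    have hconst : ∀ x ∈ (hd :: t).map (fun s => s[i]!), x = hd[i]! := by
      intro x hxm
      simp only [List.mem_map] at hxm
      obtain ⟨s, hs, hxs⟩ := hxm
      have hsl : i < s.length := by have := hmax s hs; omega
      have hhl : i < hd.length := by have := hmax hd (by simp); omega
      have := hagree i hlt s hs
      rw [List.getElem?_eq_getElem hsl, List.getElem?_eq_getElem hhl] at this
      rw [← hxs, getElem!_pos s i hsl, getElem!_pos hd i hhl]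
      exact Option.some.inj this
    rw [ofList_const _ hd[i]! (by simp) hconst]
    simp only [List.length_cons, List.length_nil]
    rw [if_neg (by omega)]
    exact pvALoop_eq hd t maxc p hple hmax hagree hdis (i + 1) (by omega)
  · have hip : i = p := by omega
    subst hip
    by_cases him : i < maxc
    · rw [if_pos him]
      obtain ⟨s, hs, hne⟩ := hdis him
      have hsl : i < s.length := by have := hmax s hs; omega
      have hhl : i < hd.length := by have := hmax hd (by simp); omega
      have hne' : s[i]! ≠ hd[i]! := by
        rw [getElem!_pos s i hsl, getElem!_pos hd i hhl]
        intro hcc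
        apply hne
        rw [List.getElem?_eq_getElem hsl, List.getElem?_eq_getElem hhl, hcc]
      have := two_mem_lt_length ((hd :: t).map (fun s => s[i]!)) s[i]! hd[i]!
        (List.mem_map.mpr ⟨s, hs, rfl⟩) (List.mem_map.mpr ⟨hd, by simp, rfl⟩) hne'
      rw [if_pos this]
    · rw [if_neg him]
termination_by i => maxc - i
decreasing_by omega

-- ===== VERDICT (by name: the statement is the Claim_ definition above) =====
theorem without_common_leading_substring_spec : Claim_equal_without_common_leading_substring := by
  intro strings _ hpre
  unfold Spec_without_common_leading_substring
  unfold without_common_leading_substring without_common_leading_substring_alt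
  cases strings with
  | nil => exact absurd rfl hpre
  | cons s0 st =>
    simp only [List.map_cons]
    set hd := s0.toList with hhd
    set t := st.map String.toList with ht
    rw [PySem.List.min?_id_cons]
    set maxc := ((t.map List.length).foldl min hd.length) with hmaxc
    have hmaxs : PySem.List.min? ((hd :: t).map List.length) (fun x => x) = some maxc := by
      rw [List.map_cons, PySem.List.min?_id_cons, hmaxc]
    have hmax : ∀ s ∈ hd :: t, maxc ≤ s.length := by
      intro s hs
      have := PySem.List.min?_isMin hmaxs s.length (List.mem_map.mpr ⟨s, hs, rfl⟩)
      simpa using this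
    obtain ⟨hpre1, hpre2⟩ := fold_prefix t hd
    set P := t.foldl lcpS hd with hP
    set p := P.length with hp
    -- p ≤ maxc
    have hmem := PySem.List.min?_mem hmaxs
    have hple : p ≤ maxc := by
      simp only [List.map_cons, List.mem_cons, List.mem_map] at hmem
      rcases hmem with hmem | hmem
      · have := hpre1.length_le; omega
      · obtain ⟨s, hs, hsl⟩ := hmem
        have := (hpre2 s hs).length_le; omega
    -- agreement below p
    have hagree : ∀ j < p, ∀ s ∈ hd :: t, s[j]? = hd[j]? := by
      intro j hj s hs
      rcases List.mem_cons.mp hs with hs | hs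
      · rw [hs]
      · rw [prefix_getElem? (hpre2 s hs) hj, prefix_getElem? hpre1 hj]
    -- disagreement at p (if p < maxc)
    have hdis : p < maxc → ∃ s ∈ hd :: t, s[p]? ≠ hd[p]? := by
      intro hpm
      by_contra hno
      push Not at hno
      have : p + 1 ≤ p := by
        apply fold_max t hd (p + 1) (by have := hmax hd (by simp); omega)
        intro s hs
        refine ⟨by have := hmax s (by simp [hs]); omega, ?_⟩
        apply List.ext_getElem?_iff.mpr
        intro j
        by_cases hjp : j < p + 1
        · rw [List.getElem?_take_of_lt hjp, List.getElem?_take_of_lt hjp]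
          rcases Nat.lt_or_ge j p with hjlt | hjge
          · exact hagree j hjlt s (by simp [hs])
          · have hjp' : j = p := by omega
            subst hjp'
            exact hno s (by simp [hs])
        · simp [hjp]
      omega
    have hloop : pvALoop (hd :: t) maxc 0 = p :=
      pvALoop_eq hd t maxc p hple hmax hagree hdis 0 (Nat.zero_le _)
    have hfold : t.foldl pvLcp hd = P := by
      rw [hP]
      congr 1
      funext a b
      exact pvLcp_eq_lcpS a b
    simp only [hloop, hfold]
    rw [hp]
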